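-- pv_equiv track=rewrite | github.com/ManglaSourav/UofA-Coursework | CS581/extra/seq.py | find_tagseq
-- ===== SOURCE A (Python) =====
-- def find_tagseq(seq, tagws):
--       ans = []
--       n = len(seq)
--       for idx in (i for i,tup in enumerate(tagws[:-n+1]) if tup[1]==seq[0]):
--           d = dict(tagws[idx:idx+n])
--           if list(d.values()) == seq:
--               ans.append(list(d.keys()))
--       return ans
-- ===== SOURCE B (Python) =====
-- def find_tagseq(seq, tagws):
--     n = len(seq)
--     if n == 0:
--         return []
--     keys = [k for k, _ in tagws]
--     vals = [v for _, v in tagws]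
--     m = len(tagws)
--     if m < n:
--         return []
--     # column-wise candidate filtering: survivors match seq on every column seen so far
--     cand = list(range(m - n + 1))
--     for j, s in enumerate(seq):
--         cand = [p for p in cand if vals[p + j] == s]
--     # one forward pass: dstart[i] = smallest t such that keys[t..i] are pairwise distinct
--     last = {}
--     start = 0
--     dstart = []
--     for i, k in enumerate(keys):
--         if k in last and last[k] >= start:
--             start = last[k] + 1
--         last[k] = i
--         dstart.append(start)
--     return [keys[p:p + n] for p in cand if dstart[p + n - 1] <= p]
-- ===== Notes on version B (the rewrite author's own statement) =====
-- stated objective: alternative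
-- what changed: B replaces A's per-candidate dict construction and whole-window comparison by column-wise candidate filtering (one pass per seq position over the surviving start positions) plus a single forward two-pointer pass that precomputes, for every end index, the earliest start of a duplicate-free key run, so no per-window dict or distinctness scan remains.
-- intended difference: On seq of length 1 with some pair in tagws whose value equals seq[0], A returns [] (its slice tagws[:-1+1] is empty, so it scans no candidates), while B returns the matching single-pair windows' key lists, which is the intended behaviour. — e.g. on find_tagseq(["a"], [("k", "a")]): A returns [], B returns [["k"]]
-- outside the precondition, e.g. on find_tagseq([], [('a', 'b')]): A raises IndexError, B returns []
import Mathlib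
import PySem

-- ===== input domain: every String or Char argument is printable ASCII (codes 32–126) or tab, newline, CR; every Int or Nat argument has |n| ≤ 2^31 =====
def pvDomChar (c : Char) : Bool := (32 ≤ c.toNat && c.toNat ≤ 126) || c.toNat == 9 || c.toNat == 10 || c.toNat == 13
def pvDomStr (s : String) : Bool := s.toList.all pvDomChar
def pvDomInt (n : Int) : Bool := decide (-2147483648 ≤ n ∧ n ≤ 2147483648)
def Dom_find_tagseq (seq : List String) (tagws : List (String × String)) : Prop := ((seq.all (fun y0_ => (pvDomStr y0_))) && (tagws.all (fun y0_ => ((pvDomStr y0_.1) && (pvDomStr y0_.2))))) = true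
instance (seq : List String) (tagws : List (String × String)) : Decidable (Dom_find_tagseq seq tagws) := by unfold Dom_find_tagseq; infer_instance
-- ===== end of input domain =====

-- B replaces A's per-window dict building with column-wise candidate filtering (one pass
-- per seq position over the surviving starts) plus a single forward two-pointer pass
-- computing, for every end index, the earliest start of a duplicate-free key run;
-- objective: alternative (no per-window dict, no per-window distinctness scan).

-- ===== PORT A =====
def find_tagseq (seq : List String) (tagws : List (String × String)) : List (List String) :=
  let n : Int := (seq.length : Int)
  ((PySem.List.enumerate (PySem.List.slice tagws none (some (-n + 1))) 0).filter
      (fun p => p.2.2 == seq.headD "")).foldl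
    (fun ans p =>
      let d := PySem.Dict.ofList (PySem.List.slice tagws (some p.1) (some (p.1 + n)))
      if d.values = seq then ans ++ [d.keys] else ans) []

-- ===== PORT B =====
def find_tagseq_alt (seq : List String) (tagws : List (String × String)) : List (List String) :=
  let n : Int := (seq.length : Int)
  if seq = [] then []
  else
    let keys := tagws.map Prod.fst
    let vals := tagws.map Prod.snd
    let m : Int := (tagws.length : Int)
    if m < n then []
    else
      -- column-wise candidate filtering
      let cand := (PySem.List.enumerate seq 0).foldl
        (fun c js => c.filter (fun p => PySem.List.pyGetD vals (p + js.1) "" == js.2))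
        (PySem.List.pyRange 0 (m - n + 1) 1)
      -- forward pass: dstart[i] = smallest t such that keys[t..i] are pairwise distinct
      let st := (PySem.List.enumerate keys 0).foldl
        (fun (acc : PySem.Dict String Int × Int × List Int) ik =>
          let last := acc.1
          let start := acc.2.1
          let start' := if last.contains ik.2 ∧ start ≤ last.getD ik.2 0
                        then last.getD ik.2 0 + 1 else start
          (last.insert ik.2 ik.1, start', acc.2.2 ++ [start']))
        (PySem.Dict.empty, 0, [])
      cand.filterMap (fun p =>
        if PySem.List.pyGetD st.2.2 (p + n - 1) 0 ≤ p then
          some (PySem.List.slice keys (some p) (some (p + n)))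
        else none)

-- ===== PRECONDITION & SPEC =====
-- Pre_ excludes inputs with empty seq and nonempty tagws, on which A raises IndexError (seq[0]).
def Pre_find_tagseq (seq : List String) (tagws : List (String × String)) : Prop :=
  seq ≠ [] ∨ tagws = []
instance (seq : List String) (tagws : List (String × String)) : Decidable (Pre_find_tagseq seq tagws) := by unfold Pre_find_tagseq; infer_instance
def pvWitness_find_tagseq : List String × (List (String × String)) :=
  (["a", "b"], [("k1", "a"), ("k2", "b")])

-- On single-element seq, A's slice tagws[:-1+1] is empty, so A always returns [] even when a
-- matching window exists; B returns those single-pair windows, which is the intended behaviour.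
def D_find_tagseq (seq : List String) (tagws : List (String × String)) : Prop :=
  seq.length = 1 ∧ ∃ p ∈ tagws, p.2 = seq.headD ""
instance (seq : List String) (tagws : List (String × String)) : Decidable (D_find_tagseq seq tagws) := by unfold D_find_tagseq; infer_instance

def Spec_find_tagseq (seq : List String) (tagws : List (String × String)) (out : List (List String)) : Prop := ¬ D_find_tagseq seq tagws → out = find_tagseq_alt seq tagws
instance (seq : List String) (tagws : List (String × String)) (out : List (List String)) : Decidable (Spec_find_tagseq seq tagws out) := by unfold Spec_find_tagseq; infer_instance

def pvDiffWitness_find_tagseq : List String × (List (String × String)) :=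
  (["a"], [("k", "a")])
def pvDiffWitnessOut_find_tagseq : (List (List String)) × (List (List String)) :=
  ([], [["k"]])

-- ===== CLAIM (what is proved, stated in full; the proofs are below) =====
def Claim_unchanged_find_tagseq : Prop := ∀ (seq : List String) (tagws : List (String × String)), Dom_find_tagseq seq tagws → Pre_find_tagseq seq tagws → Spec_find_tagseq seq tagws (find_tagseq seq tagws)
def Claim_changed_find_tagseq : Prop := Dom_find_tagseq (pvDiffWitness_find_tagseq.1) (pvDiffWitness_find_tagseq.2) ∧ Pre_find_tagseq (pvDiffWitness_find_tagseq.1) (pvDiffWitness_find_tagseq.2) ∧ D_find_tagseq (pvDiffWitness_find_tagseq.1) (pvDiffWitness_find_tagseq.2) ∧ find_tagseq (pvDiffWitness_find_tagseq.1) (pvDiffWitness_find_tagseq.2) = pvDiffWitnessOut_find_tagseq.1 ∧ find_tagseq_alt (pvDiffWitness_find_tagseq.1) (pvDiffWitness_find_tagseq.2) = pvDiffWitnessOut_find_tagseq.2 ∧ pvDiffWitnessOut_find_tagseq.1 ≠ pvDiffWitnessOut_find_tagseq.2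
def Claim_exact_find_tagseq : Prop := ∀ (seq : List String) (tagws : List (String × String)), Dom_find_tagseq seq tagws → Pre_find_tagseq seq tagws → D_find_tagseq seq tagws → find_tagseq seq tagws ≠ find_tagseq_alt seq tagws

-- ===== LEMMAS AND PROOFS =====

-- the common canonical form both ports are reduced to (n = seq.length ≥ 1)
def pvWin {α : Type} (xs : List α) (p n : Nat) : List α := (xs.drop p).take n

def pvCanon (seq : List String) (tagws : List (String × String)) : List (List String) :=
  ((PySem.List.pyRange 0 ((tagws.length : Int) - (seq.length : Int) + 1) 1).filter
      (fun p => decide (pvWin (tagws.map Prod.snd) p.toNat seq.length = seq ∧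
                        (pvWin (tagws.map Prod.fst) p.toNat seq.length).Nodup))).map
    (fun p => pvWin (tagws.map Prod.fst) p.toNat seq.length)

-- ---------- generic A-side lemmas (dict window facts) ----------

theorem pv_ofList_sublist {α : Type} [BEq α] [LawfulBEq α] (xs : List α) :
    (PySem.Set.ofList xs).Sublist xs := by
  induction xs using List.reverseRecOn with
  | nil => simp [PySem.Set.ofList]
  | append_singleton xs x ih =>
    rw [PySem.Set.ofList_append_singleton, PySem.Set.add_eq_ite]
    split
    · exact ih.trans (List.sublist_append_left xs [x])
    · exact List.Sublist.append ih (List.Sublist.refl [x])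

theorem pv_nodup_of_len {α : Type} [BEq α] [LawfulBEq α] (xs : List α)
    (h : (PySem.Set.ofList xs).length = xs.length) : xs.Nodup := by
  have := (pv_ofList_sublist xs).eq_of_length h
  rw [← this]; exact PySem.Set.nodup_ofList xs

theorem pv_len_lt_of_not_nodup {α : Type} [BEq α] [LawfulBEq α] (xs : List α)
    (h : ¬ xs.Nodup) : (PySem.Set.ofList xs).length < xs.length := by
  rcases Nat.lt_or_eq_of_le (PySem.Set.length_ofList_le xs) with h1 | h1
  · exact h1
  · exact absurd (pv_nodup_of_len xs h1) h

theorem pv_dict_items {w : List (String × String)} (h : (w.map Prod.fst).Nodup) :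
    (PySem.Dict.ofList w).items = w := by
  have := PySem.Dict.items_foldl_insert_fresh w Prod.fst Prod.snd PySem.Dict.empty
    (fun a _ => PySem.Dict.contains_empty _) h
  simpa [PySem.Dict.ofList] using this

theorem pv_dict_keys (w : List (String × String)) :
    (PySem.Dict.ofList w).keys = PySem.Set.ofList (w.map Prod.fst) := by
  have := PySem.Dict.keys_foldl_insert_key w Prod.fst (fun d p => p.2) PySem.Dict.empty
  simpa [PySem.Dict.ofList, PySem.Dict.keys_empty, PySem.Set.update_nil_left] using this

theorem pv_dict_values_len (w : List (String × String)) :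
    (PySem.Dict.ofList w).values.length = (PySem.Set.ofList (w.map Prod.fst)).length := by
  have hk := pv_dict_keys w
  have : (PySem.Dict.ofList w).values.length = (PySem.Dict.ofList w).keys.length := by
    simp [PySem.Dict.values, PySem.Dict.keys]
  rw [this, hk]

theorem pv_window_iff (seq : List String) (w : List (String × String)) (hw : w.length = seq.length) :
    (PySem.Dict.ofList w).values = seq ↔
      (w.map Prod.snd = seq ∧ (w.map Prod.fst).Nodup) := by
  by_cases hk : (w.map Prod.fst).Nodup
  · have hi := pv_dict_items hk
    have hv : (PySem.Dict.ofList w).values = w.map Prod.snd := by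
      simp [PySem.Dict.values, hi]
    rw [hv]
    exact ⟨fun h => ⟨h, hk⟩, fun h => h.1⟩
  · constructor
    · intro h
      have hl := pv_len_lt_of_not_nodup (w.map Prod.fst) hk
      have := pv_dict_values_len w
      rw [h] at this
      simp only [List.length_map] at hl
      omega
    · intro h; exact absurd h.2 hk

theorem pv_map_filter_congr {α β : Type} (l : List α) (p q : α → Bool) (f g : α → β)
    (hpq : ∀ x ∈ l, p x = q x) (hfg : ∀ x ∈ l, q x = true → f x = g x) :
    (l.filter p).map f = (l.filter q).map g := by
  induction l with
  | nil => rfl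
  | cons a l ih =>
    have h1 := hpq a (List.mem_cons_self)
    have ih' := ih (fun x hx => hpq x (List.mem_cons_of_mem a hx))
      (fun x hx => hfg x (List.mem_cons_of_mem a hx))
    by_cases hq : q a = true
    · rw [List.filter_cons_of_pos (by rw [h1]; exact hq), List.filter_cons_of_pos hq]
      simp only [List.map_cons, ih', hfg a (List.mem_cons_self) hq]
    · rw [List.filter_cons_of_neg (by rw [h1]; simpa using hq), List.filter_cons_of_neg (by simpa using hq)]
      exact ih'

-- ---------- A = canonical form (n ≥ 2) ----------

theorem pv_A_canon (seq : List String) (tagws : List (String × String)) (h2 : 2 ≤ seq.length) :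
    find_tagseq seq tagws = pvCanon seq tagws := by
  obtain ⟨s, rest, rfl⟩ : ∃ s rest, seq = s :: rest := by
    cases seq with
    | nil => simp at h2
    | cons a l => exact ⟨a, l, rfl⟩
  set seq := s :: rest with hseq
  obtain ⟨k, hk, hk1⟩ : ∃ k, seq.length = k + 1 ∧ 1 ≤ k :=
    ⟨seq.length - 1, by omega, by omega⟩
  simp only [find_tagseq]
  have hexp : (-(seq.length : Int) + 1) = -(k : Int) := by push_cast [hk]; omega
  rw [hexp, PySem.List.slice_to_neg_natCast tagws k (by omega)]
  rw [PySem.List.enumerate_eq_map_pyRange _ ("", "")]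
  simp only [PySem.List.foldl_append_ite, List.nil_append]
  rw [List.filter_map, List.filter_map, List.filter_filter, List.map_map]
  simp only [Function.comp_def]
  have hlen : PySem.List.len (List.take (tagws.length - k) tagws) = ((tagws.length - k : Nat) : Int) := by
    simp [List.length_take]
  rw [hlen]
  have hR : PySem.List.pyRange 0 ((tagws.length - k : Nat) : Int) =
      PySem.List.pyRange 0 ((tagws.length : Int) - (seq.length : Int) + 1) := by
    by_cases hkm : k ≤ tagws.length
    · congr 1; push_cast [hk]; omega
    · rw [PySem.List.pyRange_one_eq_nil (by omega),
        PySem.List.pyRange_one_eq_nil (by push_cast [hk]; omega)]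
  rw [hR]
  unfold pvCanon
  have hmem : ∀ (j : Int) (hj0 : 0 ≤ j) (hjlt : j < (tagws.length : Int) - (seq.length : Int) + 1),
      j.toNat < tagws.length := by intro j hj0 hjlt; omega
  have key : ∀ (j : Int) (hj0 : 0 ≤ j) (hjlt : j < (tagws.length : Int) - (seq.length : Int) + 1),
      (PySem.List.slice tagws (some j) (some (j + (seq.length : Int))) =
          (tagws.drop j.toNat).take seq.length ∧
        PySem.List.pyGetD (tagws.take (tagws.length - k)) j ("", "") = tagws[j.toNat]'(hmem j hj0 hjlt) ∧
        ((tagws.drop j.toNat).take seq.length).length = seq.length) := by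
    intro j hj0 hjlt
    have hjn : j.toNat + seq.length ≤ tagws.length := by omega
    refine ⟨?_, ?_, ?_⟩
    · rw [PySem.List.slice_toNat _ hj0 (by omega)]
      rw [show (j + (seq.length : Int)).toNat - j.toNat = seq.length by omega]
    · have hjp : j < ((tagws.take (tagws.length - k)).length : Int) := by
        simp [List.length_take]; omega
      rw [PySem.List.pyGetD_eq_getElem _ _ hj0 hjp]
      exact List.getElem_take
    · simp; omega
  have hwins : ∀ (j : Int), 0 ≤ j →
      ((tagws.drop j.toNat).take seq.length).map Prod.snd = pvWin (tagws.map Prod.snd) j.toNat seq.length ∧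
      ((tagws.drop j.toNat).take seq.length).map Prod.fst = pvWin (tagws.map Prod.fst) j.toNat seq.length := by
    intro j _
    unfold pvWin
    rw [← List.map_drop, ← List.map_drop, ← List.map_take, ← List.map_take]
    exact ⟨rfl, rfl⟩
  have hfirst : ∀ (j : Int) (hj0 : 0 ≤ j) (hjlt : j < (tagws.length : Int) - (seq.length : Int) + 1),
      ((tagws.drop j.toNat).take seq.length).map Prod.snd = seq →
      (tagws[j.toNat]'(hmem j hj0 hjlt)).2 = s := by
    intro j hj0 hjlt hms
    have hl0 : 0 < ((tagws.drop j.toNat).take seq.length).length := by simp; omega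
    have h0 : (((tagws.drop j.toNat).take seq.length).map Prod.snd)[0]'(by simpa using hl0) =
        seq[0]'(by simp [hseq]) := by
      simp only [hms]
    simpa [List.getElem_take, List.getElem_drop, hseq] using h0
  apply pv_map_filter_congr
  · intro j hj
    rw [PySem.List.mem_pyRange_one] at hj
    obtain ⟨hj0, hjlt⟩ := hj
    obtain ⟨hs1, hs4, hs5⟩ := key j hj0 hjlt
    obtain ⟨hw2, hw1⟩ := hwins j hj0
    rw [hs1, hs4]
    rw [Bool.eq_iff_iff]
    simp only [Bool.and_eq_true, decide_eq_true_eq, beq_iff_eq]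
    rw [pv_window_iff seq _ hs5, hw2, hw1]
    constructor
    · rintro ⟨hd, -⟩
      exact hd
    · rintro ⟨hv, hn⟩
      refine ⟨⟨hv, hn⟩, ?_⟩
      have := hfirst j hj0 hjlt (by rw [hw2]; exact hv)
      simpa [hseq] using this
  · intro j hj hq
    rw [PySem.List.mem_pyRange_one] at hj
    obtain ⟨hj0, hjlt⟩ := hj
    obtain ⟨hs1, hs4, hs5⟩ := key j hj0 hjlt
    obtain ⟨hw2, hw1⟩ := hwins j hj0
    simp only [decide_eq_true_eq] at hq
    obtain ⟨hv, hn⟩ := hq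
    rw [← hw1] at hn ⊢
    rw [hs1, pv_dict_keys, PySem.Set.ofList_eq_self_of_nodup _ hn]

-- ---------- B-side: column filtering ----------

theorem pv_foldl_filter {α β : Type} (xs : List α) (c0 : List β) (f : α → β → Bool) :
    xs.foldl (fun c x => c.filter (f x)) c0 = c0.filter (fun p => xs.all (fun x => f x p)) := by
  induction xs generalizing c0 with
  | nil => simp
  | cons a xs ih =>
    simp only [List.foldl_cons, ih, List.filter_filter, List.all_cons]
    exact List.filter_congr (fun p _ => by rw [Bool.and_comm])

-- ---------- B-side: last occurrence and distinct-run start ----------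

def pvLastOcc : List String → String → Option Nat
  | [], _ => none
  | x :: xs, k =>
    match pvLastOcc xs k with
    | some j => some (j + 1)
    | none => if x = k then some 0 else none

theorem pvLastOcc_snoc (xs : List String) (x k : String) :
    pvLastOcc (xs ++ [x]) k = if x = k then some xs.length else pvLastOcc xs k := by
  induction xs with
  | nil => by_cases h : x = k <;> simp [pvLastOcc, h]
  | cons a xs ih =>
    simp only [List.cons_append, pvLastOcc, ih]
    by_cases h : x = k <;> simp [h]

-- some j: keys[j] = k and no later occurrence
theorem pvLastOcc_some (xs : List String) (k : String) (j : Nat)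
    (h : pvLastOcc xs k = some j) :
    j < xs.length ∧ xs[j]? = some k ∧ ∀ j', j < j' → j' < xs.length → xs[j']? ≠ some k := by
  induction xs using List.reverseRecOn generalizing j with
  | nil => simp [pvLastOcc] at h
  | append_singleton xs x ih =>
    rw [pvLastOcc_snoc] at h
    by_cases hx : x = k
    · rw [if_pos hx] at h
      injection h with h; subst h
      refine ⟨by simp, by simp [hx], ?_⟩
      intro j' h1 h2 h3
      simp at h2; omega
    · rw [if_neg hx] at h
      obtain ⟨hlt, hget, hmax⟩ := ih j h
      refine ⟨by simp; omega, by rw [List.getElem?_append_left hlt]; exact hget, ?_⟩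
      intro j' h1 h2 h3
      simp at h2
      rcases Nat.lt_or_ge j' xs.length with h4 | h4
      · exact hmax j' h1 h4 (by rwa [List.getElem?_append_left h4] at h3)
      · have : j' = xs.length := by omega
        subst this
        rw [List.getElem?_append_right (le_refl _)] at h3
        simp at h3
        exact hx h3

theorem pvLastOcc_none (xs : List String) (k : String)
    (h : pvLastOcc xs k = none) : ∀ j, j < xs.length → xs[j]? ≠ some k := by
  induction xs using List.reverseRecOn with
  | nil => simp
  | append_singleton xs x ih =>
    rw [pvLastOcc_snoc] at h
    by_cases hx : x = k
    · rw [if_pos hx] at h; exact absurd h (by simp)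
    · rw [if_neg hx] at h
      intro j hj hget
      simp at hj
      rcases Nat.lt_or_ge j xs.length with h4 | h4
      · exact ih h j h4 (by rwa [List.getElem?_append_left h4] at hget)
      · have : j = xs.length := by omega
        subst this
        rw [List.getElem?_append_right (le_refl _)] at hget
        simp at hget
        exact hx hget

def pvSrev : List String → Nat
  | [] => 0
  | x :: rxs =>
    let s := pvSrev rxs
    match pvLastOcc rxs.reverse x with
    | some j => if s ≤ j then j + 1 else s
    | none => s

def pvS (xs : List String) : Nat := pvSrev xs.reverse

theorem pvS_nil : pvS [] = 0 := rfl

theorem pvS_snoc (xs : List String) (x : String) :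
    pvS (xs ++ [x]) =
      match pvLastOcc xs x with
      | some j => if pvS xs ≤ j then j + 1 else pvS xs
      | none => pvS xs := by
  simp [pvS, pvSrev, List.reverse_append]

theorem pv_mem_drop {x : String} {xs : List String} {t : Nat} :
    x ∈ xs.drop t ↔ ∃ j, t ≤ j ∧ j < xs.length ∧ xs[j]? = some x := by
  rw [List.mem_iff_getElem]
  constructor
  · rintro ⟨i, hi, hx⟩
    have hlen : t + i < xs.length := by
      have := hi; simp [List.length_drop] at this; omega
    refine ⟨t + i, by omega, hlen, ?_⟩
    rw [List.getElem?_eq_getElem hlen]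
    rw [List.getElem_drop] at hx
    rw [hx]
  · rintro ⟨j, htj, hj, hx⟩
    refine ⟨j - t, by simp [List.length_drop]; omega, ?_⟩
    rw [List.getElem_drop]
    rw [List.getElem?_eq_getElem hj] at hx
    injection hx with hx
    rw [← hx]
    congr 1; omega

theorem pv_nodup_snoc_iff {l : List String} {x : String} :
    (l ++ [x]).Nodup ↔ l.Nodup ∧ x ∉ l := by
  rw [List.nodup_append]
  constructor
  · rintro ⟨h1, -, h3⟩
    exact ⟨h1, fun hx => h3 x hx x (by simp) rfl⟩
  · rintro ⟨h1, h2⟩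
    refine ⟨h1, List.nodup_singleton x, ?_⟩
    intro a ha b hb hab
    simp only [List.mem_singleton] at hb
    subst hb; subst hab
    exact h2 ha

-- pvS xs is the least start t with (xs.drop t).Nodup
theorem pvS_spec (xs : List String) :
    pvS xs ≤ xs.length ∧ (xs.drop (pvS xs)).Nodup ∧
      ∀ u, (xs.drop u).Nodup → pvS xs ≤ u := by
  induction xs using List.reverseRecOn with
  | nil => exact ⟨by simp [pvS_nil], by simp [pvS_nil], fun u _ => by simp [pvS_nil]⟩
  | append_singleton xs x ih =>
    obtain ⟨hsle, hnd, hmin⟩ := ih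
    rw [pvS_snoc]
    -- generic facts
    have hmin' : ∀ u, u ≤ xs.length → ((xs ++ [x]).drop u).Nodup → pvS xs ≤ u := by
      intro u hu hnodup
      rw [List.drop_append_of_le_length hu] at hnodup
      exact hmin u (hnodup.sublist (List.sublist_append_left _ _))
    cases h : pvLastOcc xs x with
    | none =>
      dsimp only
      have hnotin : x ∉ xs.drop (pvS xs) := by
        intro hx
        obtain ⟨j, _, hj, hget⟩ := pv_mem_drop.1 hx
        exact pvLastOcc_none xs x h j hj hget
      refine ⟨by simp; omega, ?_, ?_⟩
      · rw [List.drop_append_of_le_length hsle]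
        exact pv_nodup_snoc_iff.2 ⟨hnd, hnotin⟩
      · intro u hu
        rcases Nat.lt_or_ge xs.length u with h4 | h4
        · omega
        · exact hmin' u h4 hu
    | some j =>
      dsimp only
      obtain ⟨hjlt, hjget, hjmax⟩ := pvLastOcc_some xs x j h
      by_cases hs : pvS xs ≤ j
      · rw [if_pos hs]
        have hnotin : x ∉ xs.drop (j + 1) := by
          intro hx
          obtain ⟨j', htj', hj', hget⟩ := pv_mem_drop.1 hx
          exact hjmax j' (by omega) hj' hget
        refine ⟨by simp; omega, ?_, ?_⟩
        · rw [List.drop_append_of_le_length (by omega)]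
          have hsub : (xs.drop (j + 1)).Sublist (xs.drop (pvS xs)) := by
            have : xs.drop (j + 1) = (xs.drop (pvS xs)).drop (j + 1 - pvS xs) := by
              rw [List.drop_drop]; congr 1; omega
            rw [this]; exact List.drop_sublist _ _
          exact pv_nodup_snoc_iff.2 ⟨hnd.sublist hsub, hnotin⟩
        · intro u hu
          by_contra hcon
          have hule : u ≤ xs.length := by omega
          rw [List.drop_append_of_le_length hule] at hu
          have hxin : x ∈ xs.drop u := pv_mem_drop.2 ⟨j, by omega, hjlt, hjget⟩
          exact (pv_nodup_snoc_iff.1 hu).2 hxin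
      · rw [if_neg hs]
        have hnotin : x ∉ xs.drop (pvS xs) := by
          intro hx
          obtain ⟨j', htj', hj', hget⟩ := pv_mem_drop.1 hx
          rcases Nat.lt_or_ge j j' with h5 | h5
          · exact hjmax j' h5 hj' hget
          · omega
        refine ⟨by simp; omega, ?_, ?_⟩
        · rw [List.drop_append_of_le_length hsle]
          exact pv_nodup_snoc_iff.2 ⟨hnd, hnotin⟩
        · intro u hu
          rcases Nat.lt_or_ge xs.length u with h4 | h4
          · omega
          · exact hmin' u h4 hu

-- the last-occurrence dict of port B
theorem pv_dict_get (ks : List String) (k : String) :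
    ((PySem.List.enumerate ks 0).foldl (fun d ik => d.insert ik.2 ik.1)
        (PySem.Dict.empty : PySem.Dict String Int)).get? k =
      (pvLastOcc ks k).map (fun j => (j : Int)) := by
  induction ks using List.reverseRecOn with
  | nil => simp [PySem.List.enumerate_nil, pvLastOcc, PySem.Dict.get?_empty]
  | append_singleton ks x ih =>
    rw [PySem.List.enumerate_append, List.foldl_append]
    simp only [PySem.List.enumerate_cons, PySem.List.enumerate_nil, List.foldl_cons, List.foldl_nil]
    rw [PySem.Dict.get?_insert, pvLastOcc_snoc]
    by_cases h : k = x
    · rw [if_pos h, if_pos h.symm]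
      simp
    · rw [if_neg h, if_neg (fun hx => h hx.symm), ih]

-- the state fold of port B computes pvS of every prefix
theorem pv_fold_ds (ks : List String) :
    (PySem.List.enumerate ks 0).foldl
      (fun (acc : PySem.Dict String Int × Int × List Int) ik =>
        let last := acc.1
        let start := acc.2.1
        let start' := if last.contains ik.2 ∧ start ≤ last.getD ik.2 0
                      then last.getD ik.2 0 + 1 else start
        (last.insert ik.2 ik.1, start', acc.2.2 ++ [start']))
      (PySem.Dict.empty, 0, []) =
    ((PySem.List.enumerate ks 0).foldl (fun d ik => d.insert ik.2 ik.1) PySem.Dict.empty,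
     (pvS ks : Int),
     (List.range ks.length).map (fun e => (pvS (ks.take (e + 1)) : Int))) := by
  induction ks using List.reverseRecOn with
  | nil => simp [PySem.List.enumerate_nil, pvS_nil]
  | append_singleton ks x ih =>
    rw [PySem.List.enumerate_append, List.foldl_append, List.foldl_append, ih]
    simp only [PySem.List.enumerate_cons, PySem.List.enumerate_nil, List.foldl_cons, List.foldl_nil]
    have hstart : (if ((PySem.List.enumerate ks 0).foldl (fun d ik => d.insert ik.2 ik.1)
          (PySem.Dict.empty : PySem.Dict String Int)).contains x ∧
          (pvS ks : Int) ≤ ((PySem.List.enumerate ks 0).foldl (fun d ik => d.insert ik.2 ik.1)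
          (PySem.Dict.empty : PySem.Dict String Int)).getD x 0
        then ((PySem.List.enumerate ks 0).foldl (fun d ik => d.insert ik.2 ik.1)
          (PySem.Dict.empty : PySem.Dict String Int)).getD x 0 + 1
        else (pvS ks : Int)) = (pvS (ks ++ [x]) : Int) := by
      rw [pvS_snoc]
      cases h : pvLastOcc ks x with
      | none =>
        dsimp only
        rw [if_neg]
        rintro ⟨hc, -⟩
        rw [PySem.Dict.contains_eq_isSome_get?, pv_dict_get, h] at hc
        simp at hc
      | some j =>
        dsimp only
        have hget : ((PySem.List.enumerate ks 0).foldl (fun d ik => d.insert ik.2 ik.1)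
            (PySem.Dict.empty : PySem.Dict String Int)).getD x 0 = (j : Int) := by
          rw [PySem.Dict.getD_eq_get?_getD, pv_dict_get, h]; rfl
        have hc : ((PySem.List.enumerate ks 0).foldl (fun d ik => d.insert ik.2 ik.1)
            (PySem.Dict.empty : PySem.Dict String Int)).contains x = true := by
          rw [PySem.Dict.contains_eq_isSome_get?, pv_dict_get, h]; rfl
        rw [hget]
        by_cases hs : pvS ks ≤ j
        · rw [if_pos ⟨hc, by exact_mod_cast hs⟩, if_pos hs]
          push_cast; ring
        · rw [if_neg (fun hcon => hs (by exact_mod_cast hcon.2)), if_neg hs]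
    rw [hstart]
    refine congrArg₂ _ ?_ (congrArg₂ _ rfl ?_)
    · simp
    · rw [List.length_append, List.length_singleton, List.range_succ, List.map_append]
      refine congrArg₂ _ ?_ ?_
      · refine List.map_congr_left ?_
        intro e he
        rw [List.mem_range] at he
        rw [List.take_append_of_le_length (by omega)]
      · simp only [List.map_cons, List.map_nil]
        rw [List.take_of_length_le (by simp)]

theorem pv_filterMap_ite {α β : Type} (c : α → Prop) [DecidablePred c] (h : α → β) (l : List α) :
    l.filterMap (fun x => if c x then some (h x) else none) =
      (l.filter (fun x => decide (c x))).map h := by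
  induction l with
  | nil => rfl
  | cons a l ih =>
    by_cases hc : c a <;> simp [hc, ih]

-- pointwise window-equality characterisation
theorem pv_win_eq_iff (vals seq : List String) (t : Nat) (h : t + seq.length ≤ vals.length) :
    pvWin vals t seq.length = seq ↔
      ∀ k, (hk : k < seq.length) → vals[t + k]'(by omega) = seq[k] := by
  have hlen : (pvWin vals t seq.length).length = seq.length := by
    simp [pvWin]; omega
  constructor
  · intro hw k hk
    have := List.getElem_of_eq hw (by rw [hlen]; exact hk)
    simpa [pvWin, List.getElem_take, List.getElem_drop] using this
  · intro hk
    apply List.ext_getElem hlen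
    intro i h1 h2
    simpa [pvWin, List.getElem_take, List.getElem_drop] using hk i h2

-- the distinct-start array tests window key-distinctness
theorem pv_S_take_iff (keys : List String) (t n' : Nat) (h : t + n' ≤ keys.length) :
    pvS (keys.take (t + n')) ≤ t ↔ (pvWin keys t n').Nodup := by
  set K := keys.take (t + n') with hK
  have hKlen : K.length = t + n' := by simp [hK]; omega
  have hwin : K.drop t = pvWin keys t n' := by
    rw [hK, List.drop_take]
    congr 1
    omega
  obtain ⟨hle, hnd, hmin⟩ := pvS_spec K
  constructor
  · intro hst
    rw [← hwin]
    have : K.drop t = (K.drop (pvS K)).drop (t - pvS K) := by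
      rw [List.drop_drop]; congr 1; omega
    rw [this]
    exact hnd.sublist (List.drop_sublist _ _)
  · intro hnodup
    exact hmin t (by rwa [hwin])

-- B = canonical form (seq ≠ [], tagws.length ≥ seq.length)
theorem pv_B_canon (seq : List String) (tagws : List (String × String))
    (hne : seq ≠ []) (hm : seq.length ≤ tagws.length) :
    find_tagseq_alt seq tagws = pvCanon seq tagws := by
  simp only [find_tagseq_alt, if_neg hne]
  rw [if_neg (by exact_mod_cast Nat.not_lt.2 hm)]
  rw [pv_foldl_filter, pv_fold_ds]
  dsimp only
  rw [pv_filterMap_ite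
      (c := fun p => PySem.List.pyGetD
        ((List.range (tagws.map Prod.fst).length).map
          (fun e => (pvS ((tagws.map Prod.fst).take (e + 1)) : Int)))
        (p + (seq.length : Int) - 1) 0 ≤ p)
      (h := fun p => PySem.List.slice (tagws.map Prod.fst) (some p) (some (p + (seq.length : Int))))]
  rw [List.filter_filter]
  unfold pvCanon
  apply pv_map_filter_congr
  · intro p hp
    rw [PySem.List.mem_pyRange_one] at hp
    obtain ⟨hp0, hplt⟩ := hp
    have hn0 : 1 ≤ seq.length := by
      cases seq with
      | nil => exact absurd rfl hne
      | cons a l => simp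
    have hbound : p.toNat + seq.length ≤ tagws.length := by omega
    have hvlen : p.toNat + seq.length ≤ (tagws.map Prod.snd).length := by simp; omega
    have hklen : p.toNat + seq.length ≤ (tagws.map Prod.fst).length := by simp; omega
    have hQ1 : (∀ x ∈ PySem.List.enumerate seq 0,
        (PySem.List.pyGetD (tagws.map Prod.snd) (p + x.1) "" == x.2) = true)
        ↔ pvWin (tagws.map Prod.snd) p.toNat seq.length = seq := by
      rw [pv_win_eq_iff _ _ _ hvlen]
      constructor
      · intro h k hk
        have hmem : ((0 : Int) + (k : Nat), seq[k]) ∈ PySem.List.enumerate seq 0 :=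
          (PySem.List.mem_enumerate_iff _ _ _).2 ⟨k, hk, rfl⟩
        have := h _ hmem
        simp only [beq_iff_eq] at this
        rw [PySem.List.pyGetD_eq_getElem _ _ (by omega) (by simp; omega)] at this
        rw [← this]
        congr 1
        omega
      · intro h x hx
        rw [PySem.List.mem_enumerate_iff] at hx
        obtain ⟨k, hk, rfl⟩ := hx
        simp only [beq_iff_eq]
        rw [PySem.List.pyGetD_eq_getElem _ _ (by omega) (by simp; omega)]
        rw [← h k hk]
        congr 1
        omega
    have hds : PySem.List.pyGetD
        ((List.range (tagws.map Prod.fst).length).map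
          (fun e => (pvS ((tagws.map Prod.fst).take (e + 1)) : Int)))
        (p + (seq.length : Int) - 1) 0
        = (pvS ((tagws.map Prod.fst).take (p.toNat + seq.length)) : Int) := by
      rw [PySem.List.pyGetD_eq_getElem _ _ (by omega)
        (by simp only [List.length_map, List.length_range]; omega)]
      have hidx : (p + (seq.length : Int) - 1).toNat = p.toNat + seq.length - 1 := by omega
      rw [List.getElem_map, List.getElem_range, hidx]
      have hn1 : p.toNat + seq.length - 1 + 1 = p.toNat + seq.length := by omega
      rw [hn1]
    have hQ2 : ((pvS ((tagws.map Prod.fst).take (p.toNat + seq.length)) : Int) ≤ p)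
        ↔ (pvWin (tagws.map Prod.fst) p.toNat seq.length).Nodup := by
      constructor
      · intro h
        exact (pv_S_take_iff _ _ _ hklen).1 (by omega)
      · intro h
        have := (pv_S_take_iff _ _ _ hklen).2 h
        omega
    rw [Bool.eq_iff_iff]
    simp only [Bool.and_eq_true, List.all_eq_true, decide_eq_true_eq]
    rw [hds, hQ1, hQ2]
    tauto
  · intro p hp _
    rw [PySem.List.mem_pyRange_one] at hp
    obtain ⟨hp0, hplt⟩ := hp
    rw [PySem.List.slice_toNat _ hp0 (by omega)]
    unfold pvWin
    congr 1
    omega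

theorem pv_B_short (seq : List String) (tagws : List (String × String))
    (hne : seq ≠ []) (hm : tagws.length < seq.length) :
    find_tagseq_alt seq tagws = [] := by
  simp only [find_tagseq_alt, if_neg hne]
  rw [if_pos (by exact_mod_cast hm)]

theorem pv_canon_short (seq : List String) (tagws : List (String × String))
    (hm : tagws.length < seq.length) : pvCanon seq tagws = [] := by
  unfold pvCanon
  rw [PySem.List.pyRange_one_eq_nil (by omega)]
  rfl

-- A returns [] on every single-element seq (its slice tagws[:-1+1] is empty)
theorem pv_A_one (s : String) (tagws : List (String × String)) :
    find_tagseq [s] tagws = [] := by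
  simp only [find_tagseq]
  rw [show (-((([s] : List String).length : Int)) + 1) = 0 by simp]
  rw [PySem.List.slice_to _ (le_refl 0)]
  simp

theorem pv_canon_one_nil (s : String) (tagws : List (String × String))
    (h : ∀ p ∈ tagws, p.2 ≠ s) : pvCanon [s] tagws = [] := by
  unfold pvCanon
  rw [List.filter_eq_nil_iff.2, List.map_nil]
  intro p hp
  rw [PySem.List.mem_pyRange_one] at hp
  obtain ⟨hp0, hplt⟩ := hp
  have hlt : p.toNat < tagws.length := by simp at hplt; omega
  simp only [decide_eq_true_eq, not_and]
  intro hw _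
  rw [pv_win_eq_iff _ _ _ (by simp; omega)] at hw
  have := hw 0 (by simp)
  simp only [Nat.add_zero] at this
  rw [List.getElem_map] at this
  exact h _ (List.getElem_mem hlt) (by simpa using this)

theorem pv_canon_one_ne (s : String) (tagws : List (String × String))
    (h : ∃ p ∈ tagws, p.2 = s) : pvCanon [s] tagws ≠ [] := by
  obtain ⟨q, hq, hqs⟩ := h
  obtain ⟨m0, hm0, rfl⟩ := List.mem_iff_getElem.1 hq
  unfold pvCanon
  intro hnil
  rw [List.map_eq_nil_iff, List.filter_eq_nil_iff] at hnil
  refine hnil (m0 : Int) ?_ ?_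
  · rw [PySem.List.mem_pyRange_one]
    constructor
    · positivity
    · simp; omega
  · have htn : (m0 : Int).toNat = m0 := by omega
    simp only [decide_eq_true_eq, htn]
    constructor
    · rw [pv_win_eq_iff _ _ _ (by simp; omega)]
      intro k hk
      simp only [List.length_singleton] at hk
      interval_cases k
      simp only [Nat.add_zero]
      rw [List.getElem_map]
      simpa using hqs
    · unfold pvWin
      rw [List.drop_eq_getElem_cons (by simp; omega)]
      simp

theorem pv_main (seq : List String) (tagws : List (String × String))
    (hpre : Pre_find_tagseq seq tagws) (hnd : ¬ D_find_tagseq seq tagws) :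
    find_tagseq seq tagws = find_tagseq_alt seq tagws := by
  cases seq with
  | nil =>
    have ht : tagws = [] := by
      rcases hpre with h | h
      · exact absurd rfl h
      · exact h
    subst ht; rfl
  | cons s rest =>
    rcases Nat.lt_or_ge tagws.length (s :: rest).length with hm | hm
    · rw [pv_B_short _ _ (by simp) hm]
      cases rest with
      | nil => exact pv_A_one s tagws
      | cons r rest' =>
        rw [pv_A_canon _ _ (by simp)]
        exact pv_canon_short _ _ hm
    · rw [pv_B_canon _ _ (by simp) hm]
      cases rest with
      | nil =>
        have h : ∀ p ∈ tagws, p.2 ≠ s := by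
          intro p hp hps
          exact hnd ⟨rfl, p, hp, by simpa using hps⟩
        rw [pv_A_one, pv_canon_one_nil s tagws h]
      | cons r rest' =>
        exact pv_A_canon _ _ (by simp)

theorem pv_tight (seq : List String) (tagws : List (String × String))
    (hd : D_find_tagseq seq tagws) :
    find_tagseq seq tagws ≠ find_tagseq_alt seq tagws := by
  obtain ⟨hl, p, hp, hps⟩ := hd
  obtain ⟨s, rfl⟩ : ∃ s, seq = [s] := by
    cases seq with
    | nil => simp at hl
    | cons a l => cases l with
      | nil => exact ⟨a, rfl⟩
      | cons b l' => simp at hl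
  have hm : ([s] : List String).length ≤ tagws.length := by
    cases tagws with
    | nil => simp at hp
    | cons t ts => simp
  rw [pv_A_one, pv_B_canon _ _ (by simp) hm]
  exact fun h => pv_canon_one_ne s tagws ⟨p, hp, by simpa using hps⟩ h.symm

-- ===== VERDICT =====
theorem find_tagseq_spec : Claim_unchanged_find_tagseq := by
  intro seq tagws _ hpre hnd
  exact pv_main seq tagws hpre hnd

theorem find_tagseq_changed : Claim_changed_find_tagseq := by
  unfold Claim_changed_find_tagseq; decide

theorem find_tagseq_tight : Claim_exact_find_tagseq := by
  intro seq tagws _ _ hd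
  exact pv_tight seq tagws hd
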